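-- pv_equiv track=rewrite | github.com/coleski/vibebuddy | windows/chirp/src/chirp/text_injector.py | _sentence_case
-- ===== SOURCE A (Python) =====
-- def _sentence_case(text: str) -> str:
--     result = []
--     capitalize_next = True
--     for ch in text:
--         if capitalize_next and ch.isalpha():
--             result.append(ch.upper())
--             capitalize_next = False
--         else:
--             result.append(ch.lower())
--         if ch in ".!?\n":
--             capitalize_next = True
--     return "".join(result)
-- ===== SOURCE B (Python) =====
-- def _sentence_case(text: str) -> str:
--     # Two-phase: split into sentence chunks (through each terminator in ".!?\n"),
--     # then capitalize the first alphabetic char of each chunk, lowercasing the rest.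
--     out = []
--     i = 0
--     n = len(text)
--     while i < n:
--         j = i
--         while j < n and text[j] not in ".!?\n":
--             j += 1
--         if j < n:
--             j += 1  # include the terminator in the chunk
--         done = False
--         for ch in text[i:j]:
--             if not done and ch.isalpha():
--                 out.append(ch.upper())
--                 done = True
--             else:
--                 out.append(ch.lower())
--         i = j
--     return "".join(out)
-- ===== Notes on version B (the rewrite author's own statement) =====
-- stated objective: alternative
-- what changed: Replaces the single carried capitalize-next flag state machine with a two-phase segment-then-capitalize pass: the text is split into chunks ending at each '.!?\n' terminator, and each chunk independently uppercases its first alphabetic character and lowercases the rest.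
import Mathlib
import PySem

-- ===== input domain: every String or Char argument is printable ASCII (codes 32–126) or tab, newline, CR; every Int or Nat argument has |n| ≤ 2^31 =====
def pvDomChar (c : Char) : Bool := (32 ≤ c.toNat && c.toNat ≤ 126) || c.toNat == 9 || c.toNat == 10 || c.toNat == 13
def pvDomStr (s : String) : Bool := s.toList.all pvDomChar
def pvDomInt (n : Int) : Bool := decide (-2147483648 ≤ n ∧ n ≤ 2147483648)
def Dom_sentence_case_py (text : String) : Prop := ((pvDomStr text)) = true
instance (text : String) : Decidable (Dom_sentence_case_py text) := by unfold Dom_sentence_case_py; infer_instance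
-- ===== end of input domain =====

-- B replaces A's carried capitalize-next flag state machine with a two-phase
-- segment-then-capitalize decomposition (split at '.!?\n', cap each chunk); same cost.


-- ===== PORT A =====
-- ch in ".!?\n"
def pvIsTerm (c : Char) : Bool := c = '.' || c = '!' || c = '?' || c = '\n'

-- A's single loop with the carried capitalize_next flag
def pvALoop : List Char → Bool → List Char
  | [], _ => []
  | c :: rest, cap =>
    let (out, cap') :=
      if cap && PySem.Chars.isalpha c then (PySem.Chars.upperChar c, false)
      else (PySem.Chars.lowerChar c, cap)
    let cap'' := if pvIsTerm c then true else cap'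
    out :: pvALoop rest cap''

def sentence_case_py (text : String) : String :=
  String.ofList (pvALoop text.toList true)

-- ===== PORT B =====
-- take one chunk: the run up to and including the next terminator (or to the end)
def pvTakeChunk : List Char → List Char × List Char
  | [] => ([], [])
  | c :: rest =>
    if pvIsTerm c then ([c], rest)
    else
      let (ch, r) := pvTakeChunk rest
      (c :: ch, r)

theorem pvTakeChunk_rest_le (l : List Char) : (pvTakeChunk l).2.length ≤ l.length := by
  induction l with
  | nil => simp [pvTakeChunk]
  | cons c rest ih =>
    simp only [pvTakeChunk]
    split
    · simp
    · simpa using Nat.le_succ_of_le ih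

-- capitalize the first alphabetic char of a chunk, lowercase the rest
def pvCapChunk : List Char → Bool → List Char
  | [], _ => []
  | c :: rest, done =>
    if !done && PySem.Chars.isalpha c then
      PySem.Chars.upperChar c :: pvCapChunk rest true
    else
      PySem.Chars.lowerChar c :: pvCapChunk rest done

def pvBLoop : List Char → List Char
  | [] => []
  | c :: rest =>
    pvCapChunk (pvTakeChunk (c :: rest)).1 false ++ pvBLoop (pvTakeChunk (c :: rest)).2
  termination_by l => l.length
  decreasing_by
    have h := pvTakeChunk_rest_le rest
    simp only [pvTakeChunk]
    split <;> simp <;> omega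

def sentence_case_py_alt (text : String) : String :=
  String.ofList (pvBLoop text.toList)

-- ===== PRECONDITION & SPEC =====
def Spec_sentence_case_py (text : String) (out : String) : Prop := out = sentence_case_py_alt text
instance (text : String) (out : String) : Decidable (Spec_sentence_case_py text out) := by unfold Spec_sentence_case_py; infer_instance

-- ===== CLAIM (what is proved, stated in full; the proofs are below) =====
def Claim_equal_sentence_case_py : Prop := ∀ (text : String), Dom_sentence_case_py text → Spec_sentence_case_py text (sentence_case_py text)

-- ===== LEMMAS AND PROOFS =====
-- A's loop on one chunk boundary equals B's chunk capitalization
theorem pvALoop_chunk (l : List Char) (done : Bool) :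
    pvALoop l (!done) =
      pvCapChunk (pvTakeChunk l).1 done ++ pvBLoop (pvTakeChunk l).2 := by
  induction l generalizing done with
  | nil => simp [pvALoop, pvTakeChunk, pvCapChunk, pvBLoop]
  | cons c rest ih =>
    by_cases ht : pvIsTerm c = true
    · have hna : PySem.Chars.isalpha c = false := by
        revert ht; simp only [pvIsTerm]
        intro ht
        rcases Bool.or_eq_true_iff.mp ht with h | h
        · rcases Bool.or_eq_true_iff.mp h with h | h
          · rcases Bool.or_eq_true_iff.mp h with h | h <;>
              simp_all <;> subst h <;> decide
          · simp_all; subst h; decide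
        · simp_all; subst h; decide
      have hB : pvALoop rest true = pvBLoop rest := by
        cases rest with
        | nil => simp [pvALoop, pvBLoop]
        | cons d rs =>
          have := ih (done := false)
          simp only [Bool.not_false] at this
          rw [this, pvBLoop]
      simp [pvALoop, pvTakeChunk, pvCapChunk, ht, hna, hB]
    · have ht' : pvIsTerm c = false := by simpa using ht
      by_cases ha : PySem.Chars.isalpha c = true
      · have h1 := ih true
        simp only [Bool.not_true] at h1
        cases done with
        | false =>
          simp [pvALoop, pvTakeChunk, pvCapChunk, ht', ha, h1]
        | true =>
          simp [pvALoop, pvTakeChunk, pvCapChunk, ht', ha, h1]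
      · have ha' : PySem.Chars.isalpha c = false := by simpa using ha
        simp [pvALoop, pvTakeChunk, pvCapChunk, ht', ha', ih done]

-- ===== VERDICT (by name: the statement is the Claim_ definition above) =====
theorem sentence_case_py_spec : Claim_equal_sentence_case_py := by
  intro text _
  unfold Spec_sentence_case_py sentence_case_py sentence_case_py_alt
  cases h : text.toList with
  | nil => simp [pvALoop, pvBLoop]
  | cons c rest =>
    have := pvALoop_chunk (c :: rest) false
    simp only [Bool.not_false] at this
    rw [this, pvBLoop]
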